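-- pv_equiv track=rewrite | github.com/8n8/trumat | rules.py | remove_newline_before_space
-- ===== SOURCE A (Python) =====
-- def remove_newline_before_space(old):
--     new = ""
--
--     for i, c in enumerate(old):
--         if c == "\n":
--             try:
--                 if old[i + 1] == " ":
--                     continue
--
--             except IndexError:
--                 pass
--
--         new += c
--
--     return new, None
-- ===== SOURCE B (Python) =====
-- def remove_newline_before_space(old):
--     # Deleting a newline that precedes a space is the same as replacing
--     # the pair "\n " by " ", since the replacement re-supplies the space.
--     return old.replace("\n ", " "), None
-- ===== Notes on version B (the rewrite author's own statement) =====
-- stated objective: idiomatic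
-- what changed: Replaces the character-by-character index-probing loop (with try/except lookahead) by a single built-in str.replace of the newline-space pair with a lone space.
import Mathlib
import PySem

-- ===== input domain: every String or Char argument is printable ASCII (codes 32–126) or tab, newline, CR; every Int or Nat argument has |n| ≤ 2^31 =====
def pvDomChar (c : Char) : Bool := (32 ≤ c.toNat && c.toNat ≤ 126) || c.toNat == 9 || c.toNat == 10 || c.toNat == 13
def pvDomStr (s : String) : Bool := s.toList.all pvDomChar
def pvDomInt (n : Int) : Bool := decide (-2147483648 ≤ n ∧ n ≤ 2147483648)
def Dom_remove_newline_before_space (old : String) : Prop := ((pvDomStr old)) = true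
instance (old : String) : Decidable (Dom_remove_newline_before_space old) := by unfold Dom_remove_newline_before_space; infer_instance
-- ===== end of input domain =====

-- B replaces A's index-probing per-character loop with a single str.replace("\n ", " "),
-- which is equivalent because the replacement text re-supplies the space (objective: idiomatic).


-- ===== PORT A =====
-- for i, c in enumerate(old): if c == '\n' and old[i+1] == ' ' (IndexError → pass): continue; new += c
def remove_newline_before_space (old : String) : String × Option String :=
  let new := (PySem.List.enumerate old.toList 0).foldl
    (fun (new : String) ic =>
      if ic.2 = '\n' ∧ PySem.Str.pyGet? old (ic.1 + 1) = some ' ' then new else new.push ic.2) ""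
  (new, none)

-- ===== PORT B =====
-- return old.replace("\n ", " "), None
def remove_newline_before_space_alt (old : String) : String × Option String :=
  (PySem.Str.replace old "\n " " ", none)

-- ===== PRECONDITION & SPEC =====
def Spec_remove_newline_before_space (old : String) (out : String × Option String) : Prop := out = remove_newline_before_space_alt old
instance (old : String) (out : String × Option String) : Decidable (Spec_remove_newline_before_space old out) := by unfold Spec_remove_newline_before_space; infer_instance

-- ===== CLAIM (what is proved, stated in full; the proofs are below) =====
def Claim_equal_remove_newline_before_space : Prop := ∀ (old : String), Dom_remove_newline_before_space old → Spec_remove_newline_before_space old (remove_newline_before_space old)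

-- ===== LEMMAS AND PROOFS =====

/-- Reference pairwise scan: drop each '\n' that immediately precedes a ' '. -/
def pvScan : List Char → List Char
  | [] => []
  | '\n' :: ' ' :: rest => ' ' :: pvScan rest
  | c :: rest => c :: pvScan rest

theorem pvScan_cons (c : Char) (t : List Char) (h : ¬ (c = '\n' ∧ t.head? = some ' ')) :
    pvScan (c :: t) = c :: pvScan t := by
  rw [pvScan.eq_def]
  split
  · simp_all
  · rename_i x rest heq
    injection heq with h1 h2
    exact absurd ⟨h1, by rw [h2]; rfl⟩ h
  · rename_i c' rest hno heq
    injection heq with h1 h2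
    rw [h1, h2]

theorem pvScan_replace_go : ∀ (fuel : Nat) (l acc : List Char), l.length ≤ fuel →
    PySem.Chars.replace.go ['\n', ' '] [' '] fuel l acc = acc.reverse ++ pvScan l := by
  intro fuel
  induction fuel with
  | zero =>
    intro l acc h
    have : l = [] := List.length_eq_zero_iff.mp (Nat.le_zero.mp h)
    subst this
    simp [PySem.Chars.replace.go, pvScan]
  | succ n ih =>
    intro l acc h
    cases l with
    | nil => simp [PySem.Chars.replace.go, pvScan]
    | cons c t =>
      rw [PySem.Chars.replace.go]
      by_cases hp : List.isPrefixOf ['\n', ' '] (c :: t) = true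
      · obtain ⟨r, hr⟩ := List.isPrefixOf_iff_prefix.mp hp
        simp only [List.cons_append, List.nil_append] at hr
        cases hr
        rw [if_pos hp]
        have hdrop : List.drop (['\n', ' '].length) ('\n' :: ' ' :: r) = r := rfl
        rw [hdrop, ih r _ (by simp at h; omega)]
        simp [pvScan]
      · rw [if_neg (by simpa using hp)]
        rw [ih t (c :: acc) (by simp at h; omega)]
        rw [pvScan_cons c t (by
          rintro ⟨h1, h2⟩
          subst h1
          cases t with
          | nil => simp at h2
          | cons x r =>
            simp only [List.head?_cons, Option.some.injEq] at h2
            subst h2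
            exact hp (by simp [List.isPrefixOf]))]
        simp

theorem pvScan_replace (l : List Char) :
    PySem.Chars.replace l ['\n', ' '] [' '] = pvScan l := by
  rw [PySem.Chars.replace]
  rw [if_neg (by simp)]
  exact pvScan_replace_go l.length l [] (le_refl _)

-- A's fold over a suffix l of old (starting at index pre.length) appends exactly pvScan l.
theorem pvFoldA (old : String) : ∀ (n : Nat) (l pre : List Char) (acc : String),
    l.length ≤ n → old.toList = pre ++ l →
    (((PySem.List.enumerate l (pre.length : Int)).foldl
      (fun (new : String) ic =>
        if ic.2 = '\n' ∧ PySem.Str.pyGet? old (ic.1 + 1) = some ' ' then new else new.push ic.2) acc)).toList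
      = acc.toList ++ pvScan l := by
  intro n
  induction n with
  | zero =>
    intro l pre acc hn hsplit
    have : l = [] := List.length_eq_zero_iff.mp (Nat.le_zero.mp hn)
    subst this
    simp [PySem.List.enumerate, pvScan]
  | succ n ih =>
    intro l pre acc hn hsplit
    cases l with
    | nil => simp [PySem.List.enumerate, pvScan]
    | cons c t =>
      rw [PySem.List.enumerate_cons, List.foldl_cons]
      have hnext : PySem.Str.pyGet? old ((pre.length : Int) + 1) = t.head? := by
        have : ((pre.length : Int) + 1) = ((pre.length + 1 : Nat) : Int) := by push_cast; ring
        rw [this, PySem.Str.pyGet?_natCast, hsplit]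
        rw [List.getElem?_append_right (by omega)]
        simp [List.head?_eq_getElem?]
      by_cases hc : c = '\n' ∧ t.head? = some ' '
      · obtain ⟨hc1, hc2⟩ := hc
        subst hc1
        cases t with
        | nil => simp at hc2
        | cons x r =>
          simp only [List.head?_cons, Option.some.injEq] at hc2
          subst hc2
          rw [if_pos ⟨rfl, by rw [hnext]; rfl⟩]
          rw [PySem.List.enumerate_cons, List.foldl_cons]
          rw [if_neg (by simp)]
          have hpre : old.toList = (pre ++ ['\n', ' ']) ++ r := by
            simpa using hsplit
          have hlen : (pre.length : Int) + 1 + 1 = (((pre ++ ['\n', ' ']).length : Nat) : Int) := by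
            simp; omega
          rw [hlen, ih r (pre ++ ['\n', ' ']) (acc.push ' ') (by simp at hn; omega) hpre]
          simp [pvScan]
      · rw [if_neg (by rintro ⟨h1, h2⟩; exact hc ⟨h1, by rw [← hnext]; exact h2⟩)]
        have hpre : old.toList = (pre ++ [c]) ++ t := by simpa using hsplit
        have hlen : (pre.length : Int) + 1 = (((pre ++ [c]).length : Nat) : Int) := by
          simp
        rw [hlen, ih t (pre ++ [c]) (acc.push c) (by simp at hn; omega) hpre]
        rw [pvScan_cons c t hc]
        simp

-- ===== VERDICT (by name: the statement is the Claim_ definition above) =====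
theorem remove_newline_before_space_spec : Claim_equal_remove_newline_before_space := by
  intro old _
  unfold Spec_remove_newline_before_space remove_newline_before_space remove_newline_before_space_alt
  have h := pvFoldA old old.toList.length old.toList [] "" (le_refl _) (by simp)
  simp only [Prod.mk.injEq, and_true]
  apply String.toList_inj.mp
  rw [PySem.Str.toList_replace]
  simpa [pvScan_replace] using h
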